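-- pv_equiv track=rewrite | github.com/ErmachenkoBoris/BranchAndCut | main.py | getMaxNeighbors
-- ===== SOURCE A (Python) =====
-- def getMaxNeighbors(grath):
--     maxNeighborsTmp = []
--     maxNeighborsValue = -1
--     for i in range(len(grath)):
--         if len(grath[i]) == maxNeighborsValue:
--             maxNeighborsTmp.append(i)
--         if len(grath[i]) > maxNeighborsValue:
--             maxNeighborsTmp = [i]
--             maxNeighborsValue = len(grath[i])
--     return maxNeighborsTmp
-- ===== SOURCE B (Python) =====
-- def getMaxNeighbors(grath):
--     m = max(map(len, grath), default=-1)
--     return [i for i in range(len(grath)) if len(grath[i]) == m]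
-- ===== Notes on version B (the rewrite author's own statement) =====
-- stated objective: simpler
-- what changed: Replaces the interleaved running-max-and-accumulate loop with two separate passes: take the maximum neighbor count (default -1 so an empty graph gives []), then filter the indices that attain it.
import Mathlib
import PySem

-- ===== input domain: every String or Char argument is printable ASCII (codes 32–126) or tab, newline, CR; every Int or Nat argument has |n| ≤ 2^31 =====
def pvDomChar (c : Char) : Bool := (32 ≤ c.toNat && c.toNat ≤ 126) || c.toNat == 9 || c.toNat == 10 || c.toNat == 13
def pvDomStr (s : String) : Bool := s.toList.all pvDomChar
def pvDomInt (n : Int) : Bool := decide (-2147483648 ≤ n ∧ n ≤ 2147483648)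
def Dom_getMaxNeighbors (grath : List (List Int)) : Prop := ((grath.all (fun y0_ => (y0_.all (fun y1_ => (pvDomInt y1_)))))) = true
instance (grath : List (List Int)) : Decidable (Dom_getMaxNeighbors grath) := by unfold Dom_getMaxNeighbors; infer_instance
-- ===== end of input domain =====

-- B replaces A's single interleaved running-max-and-collect loop by a max pass followed by a filter pass (objective: simpler).

-- ===== PORT A =====
-- the loop body: two sequential ifs over the state (tmp, maxNeighborsValue)
def getMaxNeighborsStep (grath : List (List Int)) (st : List Int × Int) (i : Int) : List Int × Int :=
  let l : Int := ((PySem.List.pyGetD grath i []).length : Int)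
  let st1 := if l = st.2 then (st.1 ++ [i], st.2) else st
  if l > st1.2 then (([i] : List Int), l) else st1

def getMaxNeighbors (grath : List (List Int)) : List Int :=
  ((PySem.List.pyRange 0 grath.length 1).foldl (getMaxNeighborsStep grath) ([], -1)).1

-- ===== PORT B =====
def getMaxNeighbors_alt (grath : List (List Int)) : List Int :=
  let m : Int := (PySem.List.max? (grath.map (fun g => (g.length : Int))) (fun x => x)).getD (-1)
  (PySem.List.pyRange 0 grath.length 1).filter
    (fun i => ((PySem.List.pyGetD grath i []).length : Int) == m)

-- ===== PRECONDITION & SPEC =====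
def Spec_getMaxNeighbors (grath : List (List Int)) (out : List Int) : Prop := out = getMaxNeighbors_alt grath
instance (grath : List (List Int)) (out : List Int) : Decidable (Spec_getMaxNeighbors grath out) := by unfold Spec_getMaxNeighbors; infer_instance

-- ===== CLAIM (what is proved, stated in full; the proofs are below) =====
def Claim_equal_getMaxNeighbors : Prop := ∀ (grath : List (List Int)), Dom_getMaxNeighbors grath → Spec_getMaxNeighbors grath (getMaxNeighbors grath)

-- ===== LEMMAS AND PROOFS =====

-- running maximum of the first n neighbor counts, as A maintains it
def runMax (grath : List (List Int)) (n : Nat) : Int :=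
  ((grath.take n).map (fun g => (g.length : Int))).foldl max (-1)

lemma foldl_max_le_init {l : List Int} {a : Int} : a ≤ l.foldl max a := by
  induction l generalizing a with
  | nil => simp
  | cons x t ih => exact le_trans (le_max_left a x) ih

lemma mem_le_foldl_max {l : List Int} {a x : Int} (hx : x ∈ l) : x ≤ l.foldl max a := by
  induction l generalizing a with
  | nil => simp at hx
  | cons y t ih =>
    rw [List.mem_cons] at hx
    rcases hx with rfl | h
    · exact le_trans (le_max_right a x) foldl_max_le_init
    · exact ih h

lemma runMax_succ (grath : List (List Int)) (n : Nat) (hn : n < grath.length) :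
    runMax grath (n + 1) = max (runMax grath n) ((grath[n].length : Int)) := by
  unfold runMax
  rw [List.take_add_one, List.getElem?_eq_getElem hn, Option.toList_some, List.map_append,
    List.foldl_append]
  rfl

lemma lenAt_le_runMax (grath : List (List Int)) (n k : Nat) (hk : k < n) (hkl : k < grath.length) :
    ((grath[k].length : Int)) ≤ runMax grath n := by
  unfold runMax
  apply mem_le_foldl_max
  refine List.mem_map.mpr ⟨grath[k], ?_, rfl⟩
  exact List.mem_take_iff_getElem.mpr ⟨k, by omega, rfl⟩

lemma pyGetD_nat (grath : List (List Int)) (k : Nat) (hk : k < grath.length) :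
    PySem.List.pyGetD grath (k : Int) [] = grath[k] := by
  rw [PySem.List.pyGetD_natCast]
  simp [hk]

-- the invariant: A's state after n iterations is (filter at runMax n, runMax n)
lemma foldA_inv (grath : List (List Int)) (n : Nat) (hn : n ≤ grath.length) :
    (PySem.List.pyRange 0 n 1).foldl (getMaxNeighborsStep grath) ([], -1) =
      ((PySem.List.pyRange 0 n 1).filter
        (fun i => ((PySem.List.pyGetD grath i []).length : Int) == runMax grath n),
       runMax grath n) := by
  induction n with
  | zero => simp [runMax]
  | succ m ih =>
    have hm : m < grath.length := by omega
    have hsplit : PySem.List.pyRange 0 ((m : Int) + 1) 1 =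
        PySem.List.pyRange 0 (m : Int) 1 ++ [(m : Int)] :=
      PySem.List.pyRange_one_succ_right (by positivity)
    have hcast : ((m + 1 : Nat) : Int) = (m : Int) + 1 := by push_cast; ring
    rw [hcast, hsplit, List.foldl_append, List.filter_append, ih (by omega)]
    simp only [List.foldl_cons, List.foldl_nil, List.filter_cons, List.filter_nil]
    have hget : PySem.List.pyGetD grath (m : Int) [] = grath[m] := pyGetD_nat grath m hm
    have hrm := runMax_succ grath m hm
    set l : Int := (grath[m].length : Int) with hl
    unfold getMaxNeighborsStep
    simp only [hget, ← hl]
    by_cases h1 : l = runMax grath m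
    · -- equal: appended to tmp, max unchanged
      have hmax : runMax grath (m + 1) = runMax grath m := by rw [hrm, h1]; simp
      simp [hmax, h1]
    · by_cases h2 : l > runMax grath m
      · -- strictly greater: tmp reset to [m], max becomes l
        have hmax : runMax grath (m + 1) = l := by rw [hrm]; exact max_eq_right (le_of_lt h2)
        simp only [if_neg h1, if_pos h2, hmax]
        have hfilt : ∀ pr : Int → Bool,
            (∀ i ∈ PySem.List.pyRange 0 (m : Int) 1, pr i = false) →
            (PySem.List.pyRange 0 (m : Int) 1).filter pr = [] := by
          intro pr h
          exact List.filter_eq_nil_iff.mpr (fun i hi => by simp [h i hi])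
        rw [hfilt _ ?_]
        · simp
        · intro i hi
          rw [PySem.List.mem_pyRange_one] at hi
          obtain ⟨hi0, him⟩ := hi
          have hk : i.toNat < m := by omega
          have : ((grath[i.toNat].length : Int)) ≤ runMax grath m :=
            lenAt_le_runMax grath m i.toNat hk (by omega)
          have hgi : PySem.List.pyGetD grath i [] = grath[i.toNat] := by
            have h' := pyGetD_nat grath i.toNat (by omega)
            rwa [Int.toNat_of_nonneg hi0] at h'
          simp only [hgi, beq_eq_false_iff_ne, ne_eq]
          omega
      · -- strictly smaller: nothing changes
        have hlt : l < runMax grath m := lt_of_le_of_ne (not_lt.mp h2) h1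
        have hmax : runMax grath (m + 1) = runMax grath m := by
          rw [hrm]; exact max_eq_left (le_of_lt hlt)
        simp [hmax, h1, h2]

-- B's max equals the running max over the whole list
lemma maxB_eq_runMax (grath : List (List Int)) :
    (PySem.List.max? (grath.map (fun g => (g.length : Int))) (fun x => x)).getD (-1) =
      runMax grath grath.length := by
  unfold runMax
  rw [List.take_length]
  cases grath with
  | nil => simp [PySem.List.max?]
  | cons g t =>
    rw [List.map_cons, PySem.List.max?_id_cons, Option.getD_some, List.foldl_cons,
      max_eq_right (by omega : (-1 : Int) ≤ (g.length : Int))]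

theorem getMaxNeighbors_eq (grath : List (List Int)) :
    getMaxNeighbors grath = getMaxNeighbors_alt grath := by
  unfold getMaxNeighbors getMaxNeighbors_alt
  rw [foldA_inv grath grath.length le_rfl, maxB_eq_runMax]

-- ===== VERDICT (by name: the statement is the Claim_ definition above) =====
theorem getMaxNeighbors_spec : Claim_equal_getMaxNeighbors := by
  intro grath _
  unfold Spec_getMaxNeighbors
  exact getMaxNeighbors_eq grath
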